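-- pv_equiv track=rewrite | github.com/skrub-data/skrub | skrub/_string_distances.py | get_unique_ngrams
-- ===== SOURCE A (Python) =====
-- def get_unique_ngrams(string: str, ngram_range: tuple[int, int]):
--     """
--     Return the set of unique n-grams of a string.
--
--     Parameters
--     ----------
--     string : str
--         The string to split in n-grams.
--     ngram_range : tuple (min_n, max_n)
--         The lower and upper boundaries of the range of n-values for different
--         n-grams used in the string similarity. All values of `n` such
--         that ``min_n <= n <= max_n`` will be used.
--
--     Returns
--     -------
--     set
--         The set of unique n-grams of the string.
--     """
--     spaces = " "  # * (n // 2 + n % 2)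
--     string = spaces + " ".join(string.lower().split()) + spaces
--     ngram_set = set()
--     for n in range(ngram_range[0], ngram_range[1] + 1):
--         string_list = [string[i:] for i in range(n)]
--         ngram_set |= set(zip(*string_list))
--     return ngram_set
-- ===== SOURCE B (Python) =====
-- def get_unique_ngrams(string: str, ngram_range: tuple[int, int]):
--     """Set of unique n-grams of `string` (same padding/lowercasing as A),
--     computed level by level: the length-n windows are derived from the
--     length-(n-1) windows by appending one character, instead of rebuilding
--     every n-gram from scratch with an n-way zip of shifted suffixes."""
--     min_n, max_n = ngram_range
--     string = " " + " ".join(string.lower().split()) + " "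
--     ngram_set = set()
--     windows = [()] * (len(string) + 1)  # the length-0 windows
--     for n in range(1, max_n + 1):
--         windows = [w + (c,) for w, c in zip(windows, string[n - 1:])]
--         if n >= min_n:
--             ngram_set |= set(windows)
--         if not windows:  # longer levels are all empty
--             break
--     return ngram_set
-- ===== Notes on version B (the rewrite author's own statement) =====
-- stated objective: alternative
-- what changed: B computes the n-gram levels incrementally: it keeps the list of length-(n-1) windows and derives each length-n window by appending one character (a level-by-level dynamic programming pass), instead of A's rebuilding every n-gram from scratch by transposing n shifted suffix copies of the string with zip(*...).
import Mathlib
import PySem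

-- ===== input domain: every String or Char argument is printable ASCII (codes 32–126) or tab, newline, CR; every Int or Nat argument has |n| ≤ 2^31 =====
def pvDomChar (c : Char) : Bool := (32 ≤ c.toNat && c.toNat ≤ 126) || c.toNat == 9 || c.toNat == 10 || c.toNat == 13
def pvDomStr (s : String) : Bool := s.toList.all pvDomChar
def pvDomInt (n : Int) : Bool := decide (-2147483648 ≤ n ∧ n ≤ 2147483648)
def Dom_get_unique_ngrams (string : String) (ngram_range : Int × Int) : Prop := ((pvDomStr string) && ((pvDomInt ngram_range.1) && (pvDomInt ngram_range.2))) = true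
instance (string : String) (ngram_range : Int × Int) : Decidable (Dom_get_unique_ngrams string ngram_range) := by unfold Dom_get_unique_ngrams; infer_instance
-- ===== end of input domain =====

-- B derives the length-n windows from the length-(n-1) windows by appending one character (a
-- level-by-level DP pass), instead of A's rebuilding every n-gram by an n-way zip of shifted
-- suffix copies of the string (alternative algorithm, same result and cost on normal ranges).

-- ===== PORT A =====
-- Python's variadic zip(*lists) over lists of chars: take heads while every list is nonempty.
-- The fuel is exactly the first list's length: zip stops at the shortest list, so the fuel
-- never runs out before the emptiness test fails; exact on every input.
def pyZipGo : Nat → List (List Char) → List (List Char)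
  | 0, _ => []
  | fuel + 1, ls =>
    if ls.all (fun t => !t.isEmpty) then
      ls.map (fun t => t.headD ' ') :: pyZipGo fuel (ls.map List.tail)
    else []

def pyZipChars : List (List Char) → List (List Char)
  | [] => []
  | l :: ls => pyZipGo l.length (l :: ls)

def get_unique_ngrams (string : String) (ngram_range : Int × Int) : List (List String) :=
  let s : List Char := (' ' :: PySem.Chars.join [' '] (PySem.Chars.split₀ (PySem.Chars.lower string.toList))) ++ [' ']
  (PySem.List.pyRange ngram_range.1 (ngram_range.2 + 1) 1).foldl (fun ngram_set n =>
    let string_list := (PySem.List.pyRange 0 n 1).map (fun i => PySem.List.slice s (some i) none)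
    PySem.Set.union ngram_set
      ((pyZipChars string_list).map (fun w => w.map (fun c => String.ofList [c])))) PySem.Set.empty

-- ===== PORT B =====
def get_unique_ngrams_alt (string : String) (ngram_range : Int × Int) : List (List String) :=
  let s : List Char := (' ' :: PySem.Chars.join [' '] (PySem.Chars.split₀ (PySem.Chars.lower string.toList))) ++ [' ']
  -- windows starts as the (len+1) length-0 windows; each loop level appends one character;
  -- the Bool in the state is Python's `break` (once windows is empty the loop stops)
  ((PySem.List.pyRange 1 (ngram_range.2 + 1) 1).foldl
    (fun (st : List (List String) × List (List String) × Bool) n =>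
      if st.2.2 then st
      else
        let windows := (st.2.1.zip (PySem.List.slice s (some (n - 1)) none)).map
          (fun wc => wc.1 ++ [String.ofList [wc.2]])
        (if ngram_range.1 ≤ n then PySem.Set.union st.1 windows else st.1, windows, windows.isEmpty))
    (PySem.Set.empty, List.replicate (s.length + 1) [], false)).1

-- ===== PRECONDITION & SPEC =====
def Spec_get_unique_ngrams (string : String) (ngram_range : Int × Int) (out : List (List String)) : Prop := out = get_unique_ngrams_alt string ngram_range
instance (string : String) (ngram_range : Int × Int) (out : List (List String)) : Decidable (Spec_get_unique_ngrams string ngram_range out) := by unfold Spec_get_unique_ngrams; infer_instance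

-- ===== CLAIM (what is proved, stated in full; the proofs are below) =====
def Claim_equal_get_unique_ngrams : Prop := ∀ (string : String) (ngram_range : Int × Int), Dom_get_unique_ngrams string ngram_range → Spec_get_unique_ngrams string ngram_range (get_unique_ngrams string ngram_range)

-- ===== LEMMAS AND PROOFS =====

-- heads of the shifted suffixes = the first n characters
lemma heads_suffixes (s : List Char) (n : Nat) (hn : n ≤ s.length) :
    (List.range n).map (fun i => (s.drop i).headD ' ') = s.take n := by
  apply List.ext_getElem
  · simp [hn]
  · intro k h1 h2
    simp only [List.getElem_map, List.getElem_range, List.getElem_take]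
    have hk : k < s.length := by simp at h1; omega
    simp [List.headD_eq_head?_getD, List.head?_drop, List.getElem?_eq_getElem hk]

-- zipping the n shifted suffixes = the sliding windows of width n
lemma zipGo_suffixes (s : List Char) (n : Nat) (hn : 1 ≤ n) :
    pyZipGo s.length ((List.range n).map (fun i => s.drop i)) =
      (List.range (s.length + 1 - n)).map (fun i => (s.drop i).take n) := by
  induction s with
  | nil =>
    have : (1 : Nat) - n = 0 := by omega
    simp [pyZipGo, this]
  | cons c t ih =>
    have hall : ((List.range n).map (fun i => (c :: t).drop i)).all (fun l => !l.isEmpty) = true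
        ↔ n ≤ t.length + 1 := by
      simp only [List.all_map, List.all_eq_true, List.mem_range]
      constructor
      · intro h
        have := h (n - 1) (by omega)
        simp at this ⊢; omega
      · intro h i hi
        simp; omega
    by_cases hle : n ≤ t.length + 1
    · rw [show (c :: t).length = t.length + 1 from rfl]
      rw [pyZipGo, if_pos (hall.mpr hle)]
      have htails : ((List.range n).map (fun i => (c :: t).drop i)).map List.tail
          = (List.range n).map (fun i => t.drop i) := by
        simp only [List.map_map]
        apply List.map_congr_left
        intro i _
        simp [List.tail_drop]
      rw [htails, ih]
      rw [show t.length + 1 + 1 - n = (t.length + 1 - n) + 1 from by omega,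
        List.range_succ_eq_map]
      simp only [List.map_cons, List.map_map, List.drop_zero]
      congr 1
      · rw [← heads_suffixes (c :: t) n (by simpa using hle)]
        simp
    · rw [show (c :: t).length = t.length + 1 from rfl]
      rw [pyZipGo, if_neg (by simp only [hall]; omega)]
      simp [show t.length + 1 + 1 - n = 0 from by omega]

-- the level-n window list, as lists of one-char strings
def Wn (s : List Char) (m : Nat) : List (List String) :=
  (List.range (s.length + 1 - m)).map (fun i => ((s.drop i).take m).map (fun c => String.ofList [c]))

lemma Wn_zero (s : List Char) : Wn s 0 = List.replicate (s.length + 1) [] := by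
  simp [Wn, List.map_const']

-- appending the next character to every level-m window yields the level-(m+1) windows
lemma Wn_step (s : List Char) (m : Nat) :
    ((Wn s m).zip (s.drop m)).map (fun wc => wc.1 ++ [String.ofList [wc.2]]) = Wn s (m + 1) := by
  apply List.ext_getElem
  · simp [Wn]; omega
  · intro k h1 h2
    have hk : k + m < s.length := by simp [Wn] at h1; omega
    simp only [List.getElem_map, List.getElem_zip, Wn, List.getElem_range, List.getElem_drop]
    rw [List.take_add_one]
    have : (s.drop k)[m]? = some s[k + m] := by
      rw [List.getElem?_drop, List.getElem?_eq_getElem (by omega)]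
    simp [this, Nat.add_comm]

-- A's per-n zip construction (mapped to strings) = the level-n windows, for 1 ≤ n
lemma zipA_eq_Wn (s : List Char) (n : Int) (hn : 1 ≤ n) :
    (pyZipChars ((PySem.List.pyRange 0 n 1).map (fun i => PySem.List.slice s (some i) none))).map
      (fun w => w.map (fun c => String.ofList [c])) = Wn s n.toNat := by
  obtain ⟨m, rfl⟩ : ∃ m : Nat, n = (m : Int) := ⟨n.toNat, by omega⟩
  have hm : 1 ≤ m := by exact_mod_cast hn
  have hL : (PySem.List.pyRange 0 (m : Int) 1).map (fun i => PySem.List.slice s (some i) none)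
      = (List.range m).map (fun i => s.drop i) := by
    rw [PySem.List.pyRange_zero_natCast, List.map_map]
    apply List.map_congr_left
    intro i _
    simp [Function.comp, PySem.List.slice_from_natCast]
  have key : pyZipChars ((List.range m).map (fun i => s.drop i))
      = (List.range (s.length + 1 - m)).map (fun i => (s.drop i).take m) := by
    rw [← zipGo_suffixes s m hm]
    obtain ⟨k, rfl⟩ : ∃ k, m = k + 1 := ⟨m - 1, by omega⟩
    rw [List.range_succ_eq_map]
    simp only [List.map_cons, List.drop_zero]
    rfl
  rw [hL, key, List.map_map, Int.toNat_natCast]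
  rfl

-- invariant of B's fold: starting from the level-m windows, the accumulated set is the fold of
-- the per-level union over the remaining range
-- a fold that never changes the accumulator returns it
lemma foldl_id {α β : Type} (l : List β) (f : α → β → α) (a : α)
    (h : ∀ x ∈ l, ∀ acc, f acc x = acc) : l.foldl f a = a := by
  induction l generalizing a with
  | nil => rfl
  | cons x t ih =>
    rw [List.foldl_cons, h x (by simp), ih]
    intro y hy acc
    exact h y (by simp [hy]) acc

-- once the loop has broken, the fold keeps its state
lemma foldB_skip (s : List Char) (lo : Int) (l : List Int)
    (st : List (List String) × List (List String) × Bool) (h : st.2.2 = true) :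
    l.foldl
      (fun (st : List (List String) × List (List String) × Bool) n =>
        if st.2.2 then st
        else
          ((if lo ≤ n then
              PySem.Set.union st.1 ((st.2.1.zip (PySem.List.slice s (some (n - 1)) none)).map
                (fun wc => wc.1 ++ [String.ofList [wc.2]]))
            else st.1),
           (st.2.1.zip (PySem.List.slice s (some (n - 1)) none)).map
             (fun wc => wc.1 ++ [String.ofList [wc.2]]),
           ((st.2.1.zip (PySem.List.slice s (some (n - 1)) none)).map
             (fun wc => wc.1 ++ [String.ofList [wc.2]])).isEmpty)) st = st := by
  induction l with
  | nil => rfl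
  | cons x t ih => rw [List.foldl_cons, if_pos h]; exact ih

lemma Wn_nil (s : List Char) (m : Nat) (h : s.length + 1 ≤ m) : Wn s m = [] := by
  simp [Wn, show s.length + 1 - m = 0 from by omega]

-- invariant of B's fold: starting (unbroken) from the level-m windows, the accumulated set is
-- the fold of the per-level union over the remaining range
lemma foldB_inv (s : List Char) (lo : Int) :
    ∀ (k : Nat) (m : Nat) (e : Int), e - ((m : Int) + 1) ≤ (k : Int) →
      ∀ (acc : List (List String)), Wn s m ≠ [] →
      ((PySem.List.pyRange ((m : Int) + 1) e 1).foldl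
        (fun (st : List (List String) × List (List String) × Bool) n =>
          if st.2.2 then st
          else
            ((if lo ≤ n then
                PySem.Set.union st.1 ((st.2.1.zip (PySem.List.slice s (some (n - 1)) none)).map
                  (fun wc => wc.1 ++ [String.ofList [wc.2]]))
              else st.1),
             (st.2.1.zip (PySem.List.slice s (some (n - 1)) none)).map
               (fun wc => wc.1 ++ [String.ofList [wc.2]]),
             ((st.2.1.zip (PySem.List.slice s (some (n - 1)) none)).map
               (fun wc => wc.1 ++ [String.ofList [wc.2]])).isEmpty))
        (acc, Wn s m, false)).1
      = (PySem.List.pyRange ((m : Int) + 1) e 1).foldl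
          (fun a n => if lo ≤ n then PySem.Set.union a (Wn s n.toNat) else a) acc := by
  intro k
  induction k with
  | zero =>
    intro m e he acc _
    rw [PySem.List.pyRange_one_eq_nil (by omega)]
    rfl
  | succ k ih =>
    intro m e he acc hne
    by_cases hlt : (m : Int) + 1 < e
    · rw [PySem.List.pyRange_one_cons hlt]
      simp only [List.foldl_cons, if_neg (by simp : ¬ false = true)]
      have h1 : (m : Int) + 1 - 1 = (m : Int) := by omega
      rw [h1, PySem.List.slice_from_natCast, Wn_step]
      have h2 : (m : Int) + 1 = ((m + 1 : Nat) : Int) := by push_cast; ring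
      have h3 : ((m : Int) + 1).toNat = m + 1 := by omega
      by_cases hw : Wn s (m + 1) = []
      · -- the break fires: the loop stops; every later level is empty too
        have hlen : s.length + 1 ≤ m + 1 := by
          by_contra hc
          have hlw : (Wn s (m + 1)).length = s.length + 1 - (m + 1) := by simp [Wn]
          rw [hw] at hlw
          simp at hlw
          omega
        rw [h3, hw]
        simp only [List.isEmpty_nil]
        rw [foldB_skip s lo _ _ rfl]
        rw [foldl_id (PySem.List.pyRange ((m : Int) + 1 + 1) e 1) _ _ (by
          intro n hn a
          have hn1 : (m : Int) + 1 + 1 ≤ n := (PySem.List.mem_pyRange_one.mp hn).1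
          rw [Wn_nil s n.toNat (by omega)]
          split <;> rfl)]
      · rw [show (Wn s (m + 1)).isEmpty = false from by simp [hw]]
        rw [h3, h2, ih (m + 1) e (by push_cast; omega) _ hw]
    · rw [PySem.List.pyRange_one_eq_nil (by omega)]
      rfl

-- ===== VERDICT (by name: the statement is the Claim_ definition above) =====
theorem get_unique_ngrams_spec : Claim_equal_get_unique_ngrams := by
  unfold Claim_equal_get_unique_ngrams
  intro string r _
  unfold Spec_get_unique_ngrams get_unique_ngrams get_unique_ngrams_alt
  set s : List Char := (' ' :: PySem.Chars.join [' '] (PySem.Chars.split₀ (PySem.Chars.lower string.toList))) ++ [' '] with hs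
  simp only []
  -- B's side: apply the fold invariant from level 0
  have hB := foldB_inv s r.1 (r.2 + 1 - 1).toNat 0 (r.2 + 1) (by omega) PySem.Set.empty
    (by simp [Wn_zero])
  rw [Wn_zero] at hB
  simp only [Nat.cast_zero, zero_add] at hB
  rw [hB]
  -- both sides are now folds of per-level unions; compare the ranges
  have hA0 : ∀ (n : Int), n ≤ 0 → ∀ acc : List (List String),
      PySem.Set.union acc
        ((pyZipChars ((PySem.List.pyRange 0 n 1).map (fun i => PySem.List.slice s (some i) none))).map
          (fun w => w.map (fun c => String.ofList [c]))) = acc := by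
    intro n hn acc
    rw [PySem.List.pyRange_one_eq_nil hn]
    rfl
  by_cases h1 : r.2 + 1 ≤ 1
  · -- no positive level: both sides are the empty set
    rw [PySem.List.pyRange_one_eq_nil h1, List.foldl_nil]
    apply foldl_id
    intro n hn acc
    exact hA0 n (by have := (PySem.List.mem_pyRange_one.mp hn).2; omega) acc
  · by_cases h2 : r.1 ≤ 1
    · -- A's range [lo, hi+1) splits at 1; the part below 1 contributes nothing
      rw [PySem.List.pyRange_one_append r.1 1 (r.2 + 1) (by omega) (by omega), List.foldl_append,
        foldl_id (PySem.List.pyRange r.1 1 1) _ PySem.Set.empty (fun n hn acc =>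
          hA0 n (by have := (PySem.List.mem_pyRange_one.mp hn).2; omega) acc)]
      apply PySem.List.foldl_congr_mem
      intro acc n hn
      have hn1 : 1 ≤ n := (PySem.List.mem_pyRange_one.mp hn).1
      rw [zipA_eq_Wn s n hn1, if_pos (by omega)]
    · -- lo > 1: B's range [1, hi+1) splits at lo; the part below lo contributes nothing
      by_cases h3 : r.1 ≤ r.2 + 1
      · rw [PySem.List.pyRange_one_append 1 r.1 (r.2 + 1) (by omega) h3, List.foldl_append,
          foldl_id (PySem.List.pyRange 1 r.1 1) _ PySem.Set.empty (by
            intro n hn acc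
            rw [if_neg (by have := (PySem.List.mem_pyRange_one.mp hn).2; omega)])]
        apply PySem.List.foldl_congr_mem
        intro acc n hn
        have hn1 : r.1 ≤ n := (PySem.List.mem_pyRange_one.mp hn).1
        rw [zipA_eq_Wn s n (by omega), if_pos hn1]
      · -- empty n-range on A's side; B's levels are all below lo
        rw [PySem.List.pyRange_one_eq_nil (by omega : r.2 + 1 ≤ r.1), List.foldl_nil]
        exact (foldl_id _ _ PySem.Set.empty (by
          intro n hn acc
          rw [if_neg (by have := (PySem.List.mem_pyRange_one.mp hn).2; omega)])).symm
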